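-- pv_equiv track=rewrite | github.com/stasy-kag/DaS | D01/ex01/read_and_write.py | parse
-- ===== SOURCE A (Python) =====
-- def parse(line):
--     result = []
--     quot = False
--
--     for ch in line:
--         if ch == '"':
--             quot = not quot
--             result.append(ch)
--         elif ch == "," and not quot:
--             result.append("\t")
--         else:
--             result.append(ch)
--     return "".join(result)
-- ===== SOURCE B (Python) =====
-- def parse(line):
--     # Split on '"': even-indexed segments are outside quotes, odd-indexed inside.
--     segs = line.split('"')
--     return '"'.join(
--         seg.replace(',', '\t') if i % 2 == 0 else seg
--         for i, seg in enumerate(segs)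
--     )
-- ===== Notes on version B (the rewrite author's own statement) =====
-- stated objective: faster
-- what changed: Replaces the per-character quote-state machine with split-on-quote / whole-segment str.replace / join, using segment index parity instead of a mutable quote flag.
import Mathlib
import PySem

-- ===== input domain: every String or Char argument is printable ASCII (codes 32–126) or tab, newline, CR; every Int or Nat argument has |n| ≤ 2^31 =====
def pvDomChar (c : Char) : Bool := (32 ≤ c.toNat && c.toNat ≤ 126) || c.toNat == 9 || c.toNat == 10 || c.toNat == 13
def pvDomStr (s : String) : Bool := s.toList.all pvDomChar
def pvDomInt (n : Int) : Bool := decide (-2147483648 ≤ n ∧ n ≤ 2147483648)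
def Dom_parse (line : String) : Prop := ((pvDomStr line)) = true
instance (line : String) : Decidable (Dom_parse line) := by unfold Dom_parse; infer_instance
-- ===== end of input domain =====

-- B replaces A's per-character quote-state machine by split-on-quote / whole-segment replace / join (objective: simpler).

-- ===== PORT A =====
-- per-character loop with a result list and a quote flag
def parse (line : String) : String :=
  String.ofList
    (line.toList.foldl
      (fun (st : List Char × Bool) ch =>
        if ch = '"' then (st.1 ++ [ch], !st.2)
        else if ch = ',' ∧ st.2 = false then (st.1 ++ ['\t'], st.2)
        else (st.1 ++ [ch], st.2)) ([], false)).1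

-- ===== PORT B =====
-- seg.replace(',', '\t') for one-char patterns, character by character
def pvRepl (c : Char) : Char := if c = ',' then '\t' else c

def parse_alt (line : String) : String :=
  String.ofList (List.intercalate ['"']
    ((line.toList.splitOn '"').mapIdx (fun i seg => if i % 2 = 0 then seg.map pvRepl else seg)))

-- ===== PRECONDITION & SPEC =====
def Spec_parse (line : String) (out : String) : Prop := out = parse_alt line
instance (line : String) (out : String) : Decidable (Spec_parse line out) := by unfold Spec_parse; infer_instance

-- ===== CLAIM (what is proved, stated in full; the proofs are below) =====
def Claim_equal_parse : Prop := ∀ (line : String), Dom_parse line → Spec_parse line (parse line)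

-- ===== LEMMAS AND PROOFS =====

-- recursive characterisation of A's loop
def pvLoop (q : Bool) : List Char → List Char
  | [] => []
  | c :: cs =>
    if c = '"' then c :: pvLoop (!q) cs
    else if c = ',' ∧ q = false then '\t' :: pvLoop q cs
    else c :: pvLoop q cs

-- alternating segment view: q = true means the first segment is inside quotes
def pvAlt (q : Bool) : List (List Char) → List Char
  | [] => []
  | [s] => if q then s else s.map pvRepl
  | s :: ss => (if q then s else s.map pvRepl) ++ '"' :: pvAlt (!q) ss

lemma pv_foldl (cs : List Char) (acc : List Char) (q : Bool) :
    (cs.foldl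
      (fun (st : List Char × Bool) ch =>
        if ch = '"' then (st.1 ++ [ch], !st.2)
        else if ch = ',' ∧ st.2 = false then (st.1 ++ ['\t'], st.2)
        else (st.1 ++ [ch], st.2)) (acc, q)).1 = acc ++ pvLoop q cs := by
  induction cs generalizing acc q with
  | nil => simp [pvLoop]
  | cons c cs ih =>
    by_cases h1 : c = '"'
    · simp [pvLoop, h1, ih]
    · by_cases h2 : c = ',' ∧ q = false
      · simp [pvLoop, h1, h2, ih]
      · simp [pvLoop, h1, h2, ih]

lemma pv_splitOnP_ne_nil (cs : List Char) : List.splitOnP (· == '"') cs ≠ [] := by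
  induction cs with
  | nil => simp [List.splitOnP_nil]
  | cons c cs ih =>
    rw [List.splitOnP_cons]
    split_ifs
    · simp
    · cases h : List.splitOnP (· == '"') cs with
      | nil => exact absurd h ih
      | cons r rs => simp [h]

lemma pv_loop_eq_alt (cs : List Char) (q : Bool) :
    pvLoop q cs = pvAlt q (cs.splitOn '"') := by
  induction cs generalizing q with
  | nil => simp [pvLoop, List.splitOn, List.splitOnP_nil, pvAlt]
  | cons c cs ih =>
    by_cases h1 : c = '"'
    · subst h1
      rw [List.splitOn] at *
      rw [List.splitOnP_cons]
      cases h : List.splitOnP (· == '"') cs with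
      | nil => exact absurd h (pv_splitOnP_ne_nil cs)
      | cons r rs =>
        simp only [beq_self_eq_true, if_true, List.splitOn]
        rw [show pvAlt q ([] :: r :: rs) = (if q then [] else [].map pvRepl) ++ '"' :: pvAlt (!q) (r :: rs) from rfl]
        simp [pvLoop, ih, h]
    · rw [List.splitOn] at *
      rw [List.splitOnP_cons]
      cases h : List.splitOnP (· == '"') cs with
      | nil => exact absurd h (pv_splitOnP_ne_nil cs)
      | cons r rs =>
        simp only [beq_iff_eq, h1, if_false, List.modifyHead]
        cases rs with
        | nil =>
          have ihq := ih q
          rw [h] at ihq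
          by_cases h2 : c = ',' ∧ q = false
          · obtain ⟨hc, hq⟩ := h2
            subst hc; subst hq
            simp [pvLoop, h1, ihq, pvAlt, pvRepl]
          · cases q with
            | false =>
              have hc : ¬ c = ',' := by intro hc; exact h2 ⟨hc, rfl⟩
              simp [pvLoop, h1, hc, ihq, pvAlt, pvRepl]
            | true => simp [pvLoop, h1, ihq, pvAlt]
        | cons r2 rs' =>
          have ihq := ih q
          rw [h] at ihq
          rw [show pvAlt q ((c :: r) :: r2 :: rs') = (if q then c :: r else (c :: r).map pvRepl) ++ '"' :: pvAlt (!q) (r2 :: rs') from rfl]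
          rw [show pvAlt q (r :: r2 :: rs') = (if q then r else r.map pvRepl) ++ '"' :: pvAlt (!q) (r2 :: rs') from rfl] at ihq
          by_cases h2 : c = ',' ∧ q = false
          · obtain ⟨hc, hq⟩ := h2
            subst hc; subst hq
            simp [pvLoop, h1, ihq, pvRepl]
          · cases q with
            | false =>
              have hc : ¬ c = ',' := by intro hc; exact h2 ⟨hc, rfl⟩
              simp [pvLoop, h1, hc, ihq, pvRepl]
            | true => simp [pvLoop, h1, ihq]

lemma pv_parity_shift :
    (fun (i : Nat) (t : List Char) => if (i + 1) % 2 = 0 then t.map pvRepl else t)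
      = (fun (i : Nat) (t : List Char) => if i % 2 = 0 then t else t.map pvRepl) := by
  funext i t
  rcases Nat.mod_two_eq_zero_or_one i with h | h <;> simp [h, Nat.add_mod]

lemma pv_parity_shift' :
    (fun (i : Nat) (t : List Char) => if (i + 1) % 2 = 0 then t else t.map pvRepl)
      = (fun (i : Nat) (t : List Char) => if i % 2 = 0 then t.map pvRepl else t) := by
  funext i t
  rcases Nat.mod_two_eq_zero_or_one i with h | h <;> simp [h, Nat.add_mod]

lemma pv_mapIdx_shift_even (s : List Char) (ss : List (List Char)) :
    List.mapIdx (fun i t => if i % 2 = 0 then t.map pvRepl else t) (s :: ss)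
      = s.map pvRepl :: List.mapIdx (fun i t => if i % 2 = 0 then t else t.map pvRepl) ss := by
  rw [List.mapIdx_cons, pv_parity_shift]; simp

lemma pv_mapIdx_shift_odd (s : List Char) (ss : List (List Char)) :
    List.mapIdx (fun i t => if i % 2 = 0 then t else t.map pvRepl) (s :: ss)
      = s :: List.mapIdx (fun i t => if i % 2 = 0 then t.map pvRepl else t) ss := by
  rw [List.mapIdx_cons, pv_parity_shift']; simp

lemma pv_intercalate_cons (x : List Char) (ys : List (List Char)) (h : ys ≠ []) :
    List.intercalate ['"'] (x :: ys) = x ++ '"' :: List.intercalate ['"'] ys := by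
  cases ys with
  | nil => exact absurd rfl h
  | cons y ys' => simp [List.intercalate, List.intersperse]

lemma pv_alt_eq_mapIdx (segs : List (List Char)) :
    (pvAlt false segs = List.intercalate ['"']
        (segs.mapIdx (fun i s => if i % 2 = 0 then s.map pvRepl else s))) ∧
    (pvAlt true segs = List.intercalate ['"']
        (segs.mapIdx (fun i s => if i % 2 = 0 then s else s.map pvRepl))) := by
  induction segs with
  | nil => simp [pvAlt, List.intercalate]
  | cons s ss ih =>
    cases ss with
    | nil => simp [pvAlt, List.intercalate]
    | cons s2 ss' =>
      obtain ⟨ihf, iht⟩ := ih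
      constructor
      · rw [show pvAlt false (s :: s2 :: ss') = s.map pvRepl ++ '"' :: pvAlt true (s2 :: ss') from rfl]
        rw [iht, pv_mapIdx_shift_even, pv_intercalate_cons _ _ (by simp [List.mapIdx_cons])]
      · rw [show pvAlt true (s :: s2 :: ss') = s ++ '"' :: pvAlt false (s2 :: ss') from rfl]
        rw [ihf, pv_mapIdx_shift_odd, pv_intercalate_cons _ _ (by simp [List.mapIdx_cons])]

-- ===== VERDICT (by name: the statement is the Claim_ definition above) =====
theorem parse_spec : Claim_equal_parse := by
  intro line _
  unfold Spec_parse parse parse_alt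
  rw [pv_foldl, pv_loop_eq_alt, (pv_alt_eq_mapIdx _).1]
  simp
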